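-- pv_equiv track=rewrite | github.com/lvetri16/Proyecto1Calculo | convertor.py | cuaternario_decimal
-- ===== SOURCE A (Python) =====
-- def invertir(cadena):
--     invertido=""
--     for i in range(len(cadena)-1,-1,-1):
--         invertido+=cadena[i]
--     return invertido
--
-- def cuaternario_decimal(numero):
--     i=0
--     acum=0
--     lista=[]
--     lista2=[]
--     numerot=invertir(str(numero))
--     while(i<len(str(numero))):
--         lista.append(4**i)
--         i+=1
--     for i in numerot:
--         lista2.append(int(i))
--     for i in range(0,len(lista)):
--         acum+=lista[i]*lista2[i]
--     return acum
-- ===== SOURCE B (Python) =====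
-- def cuaternario_decimal(numero):
--     acum = 0
--     for c in str(numero):
--         acum = acum * 4 + int(c)
--     return acum
-- ===== Notes on version B (the rewrite author's own statement) =====
-- stated objective: simpler
-- what changed: Replaces the reverse-string helper, the powers-of-4 list and the digit list (three passes plus an index loop) with a single left-to-right Horner accumulator acum = acum*4 + int(c).
import Mathlib
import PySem

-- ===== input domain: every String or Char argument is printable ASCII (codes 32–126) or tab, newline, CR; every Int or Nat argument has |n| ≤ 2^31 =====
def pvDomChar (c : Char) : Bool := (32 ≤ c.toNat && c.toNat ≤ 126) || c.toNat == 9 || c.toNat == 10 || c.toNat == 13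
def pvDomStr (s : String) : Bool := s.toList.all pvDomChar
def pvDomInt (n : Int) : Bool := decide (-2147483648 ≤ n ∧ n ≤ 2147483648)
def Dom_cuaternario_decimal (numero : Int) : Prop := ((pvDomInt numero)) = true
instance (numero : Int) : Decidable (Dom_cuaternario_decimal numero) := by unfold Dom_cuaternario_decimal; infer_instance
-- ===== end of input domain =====

-- B replaces A's reverse helper, powers-of-4 list and digit list with one Horner pass; equivalence on numero ≥ 0 (A raises ValueError on negatives).

-- ===== PORT A =====
-- int(c) for a one-character string c; under Pre_ every character is a decimal digit, so ofChars? is some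
def pvDigit (c : Char) : Int := (PySem.Int.ofChars? [c]).getD 0

-- invertir: builds the reverse by indexing over range(len-1, -1, -1); the index is always in range
def invertir (cadena : List Char) : List Char :=
  (PySem.List.pyRange ((cadena.length : Int) - 1) (-1) (-1)).foldl
    (fun invertido i => invertido ++ [PySem.List.pyGetD cadena i ' ']) []

-- the while loop building lista = [4**0, 4**1, …]; counter starts at 0 and only increments, so a Nat counter is exact
def pvWhileLista (n : Nat) (i : Nat) (acc : List Int) : List Int :=
  if i < n then pvWhileLista n (i + 1) (acc ++ [(4 : Int) ^ i]) else acc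
  termination_by n - i

def cuaternario_decimal (numero : Int) : Int :=
  let s := PySem.Int.toChars numero
  let numerot := invertir s
  let lista := pvWhileLista s.length 0 []
  let lista2 := numerot.foldl (fun l c => l ++ [pvDigit c]) []
  (PySem.List.pyRange 0 (lista.length : Int) 1).foldl
    (fun acum i => acum + PySem.List.pyGetD lista i 0 * PySem.List.pyGetD lista2 i 0) 0

-- ===== PORT B =====
def cuaternario_decimal_alt (numero : Int) : Int :=
  (PySem.Int.toChars numero).foldl (fun acum c => acum * 4 + pvDigit c) 0

-- ===== PRECONDITION & SPEC =====
-- A (and B) raise ValueError on negative numero (int('-') on the sign character); nothing else is excluded.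
def Pre_cuaternario_decimal (numero : Int) : Prop := 0 ≤ numero
instance (numero : Int) : Decidable (Pre_cuaternario_decimal numero) := by unfold Pre_cuaternario_decimal; infer_instance
def pvWitness_cuaternario_decimal : Int := 3210

def Spec_cuaternario_decimal (numero : Int) (out : Int) : Prop := out = cuaternario_decimal_alt numero
instance (numero : Int) (out : Int) : Decidable (Spec_cuaternario_decimal numero out) := by unfold Spec_cuaternario_decimal; infer_instance

-- ===== CLAIM (what is proved, stated in full; the proofs are below) =====
def Claim_equal_cuaternario_decimal : Prop := ∀ (numero : Int), Dom_cuaternario_decimal numero → Pre_cuaternario_decimal numero → Spec_cuaternario_decimal numero (cuaternario_decimal numero)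

-- ===== LEMMAS AND PROOFS =====

theorem invertir_eq_reverse (l : List Char) : invertir l = l.reverse := by
  unfold invertir
  rw [show ((l.length : Int) - 1) = (-1) + (l.length : Int) by ring] at *
  rw [PySem.List.pyRange_neg_one_eq_reverse]
  rw [PySem.List.foldl_append_singleton_eq_map]
  simp only [List.nil_append, List.map_reverse]
  rw [show ((-1 : Int) + 1) = 0 by ring, show ((-1 : Int) + (l.length : Int) + 1) = (l.length : Int) by ring]
  rw [PySem.List.map_pyGetD_pyRange_zero']

theorem pvWhileLista_eq (n : Nat) : ∀ (i : Nat) (acc : List Int),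
    pvWhileLista n i acc = acc ++ (List.range (n - i)).map (fun j => (4 : Int) ^ (i + j)) := by
  intro i
  induction' h : n - i with k ih generalizing i
  · intro acc
    unfold pvWhileLista
    rw [if_neg (by omega)]
    simp
  · intro acc
    unfold pvWhileLista
    rw [if_pos (by omega)]
    rw [ih (i + 1) (by omega)]
    rw [List.range_succ_eq_map]
    simp only [List.map_cons, Nat.add_zero, List.map_map, Function.comp_def,
      List.append_assoc, List.singleton_append]
    congr 2
    apply List.map_congr_left
    intro j _
    congr 1
    omega

theorem foldl_digits_eq_map (l : List Char) : ∀ (acc : List Int),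
    l.foldl (fun l2 c => l2 ++ [pvDigit c]) acc = acc ++ l.map pvDigit :=
  fun acc => PySem.List.foldl_append_singleton_eq_map pvDigit l acc

-- the core Horner identity: summing 4^k·digit over the reversed digit list equals the left-to-right Horner fold
theorem horner_core (r : List Char) :
    ((List.range r.length).map (fun k => (4 : Int) ^ k * pvDigit (r.getD k ' '))).sum
      = r.reverse.foldl (fun acum c => acum * 4 + pvDigit c) 0 := by
  induction' r with c t ih
  · simp
  · simp only [List.length_cons, List.reverse_cons, List.range_succ_eq_map, List.map_cons,
      List.map_map, List.sum_cons, Function.comp_def, List.getD_cons_zero, List.getD_cons_succ]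
    rw [List.foldl_append]
    simp only [List.foldl_cons, List.foldl_nil]
    rw [← ih]
    have : ((List.range t.length).map fun k => (4 : Int) ^ (k + 1) * pvDigit (t.getD k ' ')).sum
        = 4 * ((List.range t.length).map fun k => (4 : Int) ^ k * pvDigit (t.getD k ' ')).sum := by
      rw [← List.sum_map_mul_left]
      congr 1
      apply List.map_congr_left
      intro k _
      ring
    simp only [this]
    ring

-- A's final fold, rewritten as the sum over the reversed digit list
theorem portA_eq (numero : Int) :
    cuaternario_decimal numero = cuaternario_decimal_alt numero := by
  unfold cuaternario_decimal cuaternario_decimal_alt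
  simp only []
  set s := PySem.Int.toChars numero with hs
  rw [invertir_eq_reverse, pvWhileLista_eq s.length 0 []]
  rw [foldl_digits_eq_map]
  simp only [Nat.sub_zero, List.nil_append, Nat.zero_add, List.length_map, List.length_range]
  rw [PySem.List.foldl_add]
  rw [PySem.List.pyRange_zero_nat]
  rw [List.map_map]
  have hmap : (List.range s.length).map
      ((fun i => PySem.List.pyGetD ((List.range s.length).map fun j => (4:Int) ^ j) i 0
          * PySem.List.pyGetD (s.reverse.map pvDigit) i 0) ∘ (fun k : Nat => (k : Int)))
      = (List.range s.length).map (fun k => (4 : Int) ^ k * pvDigit (s.reverse.getD k ' ')) := by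
    apply List.map_congr_left
    intro k hk
    simp only [Function.comp_apply, List.mem_range] at hk ⊢
    simp only [PySem.List.pyGetD_natCast]
    rw [List.getD_eq_getElem _ _ (by simpa using hk), List.getD_eq_getElem _ _ (by simpa using hk)]
    rw [List.getD_eq_getElem _ _ (by simpa using hk)]
    simp
  rw [hmap]
  rw [show s.length = s.reverse.length by simp]
  rw [horner_core s.reverse, List.reverse_reverse, zero_add]

-- ===== VERDICT (by name: the statement is the Claim_ definition above) =====
theorem cuaternario_decimal_spec : Claim_equal_cuaternario_decimal := by
  intro numero _ _
  unfold Spec_cuaternario_decimal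
  exact portA_eq numero
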